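-- pv_equiv track=rewrite | github.com/ivandom1235/ReviewOp | dataset_builder/code/data_ops.py | _group_domain
-- ===== SOURCE A (Python) =====
-- from collections import defaultdict
-- from typing import Dict, List
--
-- def _group_domain(rows: List[Dict]) -> str:
--     domain_counts = defaultdict(int)
--     for row in rows:
--         domain = str(row.get("domain", "general")).strip().lower() or "general"
--         domain_counts[domain] += 1
--     if not domain_counts:
--         return "general"
--     return max(domain_counts.items(), key=lambda kv: (kv[1], kv[0]))[0]
-- ===== SOURCE B (Python) =====
-- from typing import Dict, List
--
--
-- def _group_domain(rows: List[Dict]) -> str: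
--     ds = sorted(str(row.get("domain", "general")).strip().lower() or "general" for row in rows)
--     if not ds:
--         return "general"
--     best, best_count = "", 0
--     cur, cur_len = ds[0], 1
--     for d in ds[1:]:
--         if d == cur:
--             cur_len += 1
--         else:
--             if cur_len >= best_count:
--                 best, best_count = cur, cur_len
--             cur, cur_len = d, 1
--     if cur_len >= best_count:
--         best = cur
--     return best
-- ===== Notes on version B (the rewrite author's own statement) =====
-- stated objective: alternative
-- what changed: B replaces A's hash-count (defaultdict) plus max-with-tuple-key by a sort-then-run-length sweep: it normalizes all domains into a list, sorts it, and scans once keeping the best (longest, and on ties last i.e. lexicographically largest) run.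
import Mathlib
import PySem

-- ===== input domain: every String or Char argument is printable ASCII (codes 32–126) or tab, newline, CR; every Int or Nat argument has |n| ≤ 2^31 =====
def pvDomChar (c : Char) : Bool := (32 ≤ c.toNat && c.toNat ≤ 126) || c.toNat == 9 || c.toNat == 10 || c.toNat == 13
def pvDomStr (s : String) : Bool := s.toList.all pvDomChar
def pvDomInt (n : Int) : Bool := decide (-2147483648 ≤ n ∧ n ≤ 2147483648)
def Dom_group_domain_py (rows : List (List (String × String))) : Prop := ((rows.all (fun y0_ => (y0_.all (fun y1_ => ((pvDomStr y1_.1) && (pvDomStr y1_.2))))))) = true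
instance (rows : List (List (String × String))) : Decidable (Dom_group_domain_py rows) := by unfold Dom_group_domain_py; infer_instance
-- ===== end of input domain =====

-- B's change: a sort-then-run-length sweep replaces A's defaultdict counting plus max with tuple key; return values proved equal on all inputs.

-- shared helper: the normalization both Pythons apply to a row,
-- str(row.get("domain", "general")).strip().lower() or "general"  (str() is the identity on these str values)
def pvNorm (row : List (String × String)) : String :=
  let t := PySem.Str.lower (PySem.Str.strip ((PySem.Dict.mk row).getD "domain" "general"))
  if t = "" then "general" else t

-- ===== PORT A =====
def group_domain_py (rows : List (List (String × String))) : String :=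
  -- domain_counts = defaultdict(int); for row in rows: domain_counts[domain] += 1
  let domain_counts : PySem.Dict String Int :=
    rows.foldl (fun d row => d.modify (pvNorm row) 0 (· + 1)) PySem.Dict.empty
  -- if not domain_counts: return "general"
  if domain_counts.items.isEmpty then "general"
  else
    -- max(domain_counts.items(), key=lambda kv: (kv[1], kv[0]))[0]
    match PySem.List.max2? domain_counts.items (fun kv => kv.2) (fun kv => kv.1) with
    | some kv => kv.1
    | none => "general"

-- ===== PORT B =====
-- the body of Source B's for-loop; state = (best, best_count, cur, cur_len)
def pvStep (st : String × Nat × String × Nat) (d : String) : String × Nat × String × Nat :=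
  let (best, bc, cur, m) := st
  if d == cur then (best, bc, cur, m + 1)
  else if bc ≤ m then (cur, m, d, 1) else (best, bc, d, 1)

def group_domain_py_alt (rows : List (List (String × String))) : String :=
  let ds := PySem.List.sorted (rows.map pvNorm) (fun x => x) false
  match ds with
  | [] => "general"
  | c :: t =>
    let (best, bc, cur, m) := t.foldl pvStep ("", 0, c, 1)
    if bc ≤ m then cur else best

-- ===== PRECONDITION & SPEC =====
def Spec_group_domain_py (rows : List (List (String × String))) (out : String) : Prop := out = group_domain_py_alt rows
instance (rows : List (List (String × String))) (out : String) : Decidable (Spec_group_domain_py rows out) := by unfold Spec_group_domain_py; infer_instance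

-- ===== CLAIM (what is proved, stated in full; the proofs are below) =====
def Claim_equal_group_domain_py : Prop := ∀ (rows : List (List (String × String))), Dom_group_domain_py rows → Spec_group_domain_py rows (group_domain_py rows)

-- ===== LEMMAS AND PROOFS =====

-- generic: Python max(xs, key=lambda kv: (k1, k2)) returns a member maximal in the lexicographic order
theorem pv_max2_char {α κ₁ κ₂ : Type} [LinearOrder κ₁] [LinearOrder κ₂]
    (xs : List α) (k1 : α → κ₁) (k2 : α → κ₂) (hne : xs ≠ []) :
    ∃ m, PySem.List.max2? xs k1 k2 = some m ∧ m ∈ xs ∧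
      ∀ y ∈ xs, k1 y < k1 m ∨ (k1 y = k1 m ∧ k2 y ≤ k2 m) := by
  set lexle : α → α → Prop := fun a b => k1 a < k1 b ∨ (k1 a = k1 b ∧ k2 a ≤ k2 b) with hlexle
  have htrans : ∀ a b c, lexle a b → lexle b c → lexle a c := by
    rintro a b c (h | ⟨h1, h2⟩) (h' | ⟨h1', h2'⟩)
    · exact Or.inl (lt_trans h h')
    · exact Or.inl (h1' ▸ h)
    · exact Or.inl (h1 ▸ h')
    · exact Or.inr ⟨h1.trans h1', h2.trans h2'⟩
  have aux : ∀ (l : List α) (m0 : α), ∃ m,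
      List.foldl (fun acc x =>
        match acc with
        | none => some x
        | some m =>
          if (decide (k1 m < k1 x) || !decide (k1 x < k1 m) && decide (k2 m < k2 x)) = true then some x else some m)
        (some m0) l = some m ∧ (m = m0 ∨ m ∈ l) ∧ lexle m0 m ∧ ∀ y ∈ l, lexle y m := by
    intro l
    induction l with
    | nil => intro m0; exact ⟨m0, rfl, Or.inl rfl, Or.inr ⟨rfl, le_refl _⟩, by simp⟩
    | cons x l ih =>
      intro m0
      simp only [List.foldl_cons]
      by_cases hrep : (decide (k1 m0 < k1 x) || !decide (k1 x < k1 m0) && decide (k2 m0 < k2 x)) = true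
      · rw [if_pos hrep]
        obtain ⟨m, hm, hmem, hge, hall⟩ := ih x
        have hm0x : lexle m0 x := by
          simp only [Bool.or_eq_true, Bool.and_eq_true, Bool.not_eq_true', decide_eq_true_eq,
            decide_eq_false_iff_not] at hrep
          rcases hrep with h1 | ⟨h1, h2⟩
          · exact Or.inl h1
          · rcases lt_or_eq_of_le (not_lt.mp h1) with h | h
            · exact Or.inl h
            · exact Or.inr ⟨h, le_of_lt h2⟩
        refine ⟨m, hm, Or.inr (by rcases hmem with rfl | h; exact List.mem_cons_self ..; exact List.mem_cons_of_mem _ h), htrans m0 x m hm0x hge, ?_⟩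
        intro y hy
        rcases List.mem_cons.mp hy with rfl | hy
        · exact hge
        · exact hall y hy
      · rw [if_neg hrep]
        obtain ⟨m, hm, hmem, hge, hall⟩ := ih m0
        have hxm0 : lexle x m0 := by
          simp only [Bool.or_eq_true, Bool.and_eq_true, Bool.not_eq_true', decide_eq_true_eq,
            decide_eq_false_iff_not] at hrep
          push Not at hrep
          obtain ⟨h1, h2⟩ := hrep
          rcases lt_or_eq_of_le h1 with h | h
          · exact Or.inl h
          · exact Or.inr ⟨h, h2 (le_of_eq h.symm)⟩
        refine ⟨m, hm, by rcases hmem with rfl | h; exact Or.inl rfl; exact Or.inr (List.mem_cons_of_mem _ h), hge, ?_⟩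
        intro y hy
        rcases List.mem_cons.mp hy with rfl | hy
        · exact htrans y m0 m hxm0 hge
        · exact hall y hy
  obtain ⟨x, l, rfl⟩ := List.exists_cons_of_ne_nil hne
  simp only [PySem.List.max2?, List.foldl_cons]
  obtain ⟨m, hm, hmem, hge, hall⟩ := aux l x
  refine ⟨m, hm, ?_, ?_⟩
  · rcases hmem with rfl | h
    · exact List.mem_cons_self ..
    · exact List.mem_cons_of_mem _ h
  · intro y hy
    rcases List.mem_cons.mp hy with rfl | hy
    · exact hge
    · exact hall y hy


-- the pending count of d: cur's open run length m plus what is still ahead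
def pvCnt (s : List String) (c : String) (m : Nat) (d : String) : Nat :=
  if d = c then m + s.count c else s.count d
def pvPost (st : String × Nat × String × Nat) : String :=
  let (best, bc, cur, m) := st
  if bc ≤ m then cur else best
theorem pv_foldl_replicate (j : Nat) (t : List String) (b : String) (bc : Nat) (c : String) (m : Nat) :
    (List.replicate j c ++ t).foldl pvStep (b, bc, c, m) = t.foldl pvStep (b, bc, c, m + j) := by
  induction j generalizing m with
  | zero => simp
  | succ j ih =>
    rw [List.replicate_succ, List.cons_append, List.foldl_cons]
    simp only [pvStep, BEq.rfl, if_true]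
    rw [ih]
    ring_nf

-- main invariant of Source B's sweep over the sorted remainder
theorem pv_sweep (n : Nat) : ∀ (s : List String), s.length ≤ n → s.Pairwise (· ≤ ·) →
    ∀ (c : String), (∀ y ∈ s, c ≤ y) → ∀ (m : Nat), 0 < m → ∀ (b : String) (bc : Nat),
    (pvPost (s.foldl pvStep (b, bc, c, m)) = b ∧ ∀ y ∈ c :: s, pvCnt s c m y < bc) ∨
    (pvPost (s.foldl pvStep (b, bc, c, m)) ∈ c :: s ∧ bc ≤ pvCnt s c m (pvPost (s.foldl pvStep (b, bc, c, m))) ∧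
      ∀ y ∈ c :: s, pvCnt s c m y < pvCnt s c m (pvPost (s.foldl pvStep (b, bc, c, m))) ∨
        (pvCnt s c m y = pvCnt s c m (pvPost (s.foldl pvStep (b, bc, c, m))) ∧ y ≤ pvPost (s.foldl pvStep (b, bc, c, m)))) := by
  induction n with
  | zero =>
    intro s hlen _ c _ m hm b bc
    have hs : s = [] := List.eq_nil_of_length_eq_zero (Nat.le_zero.mp hlen)
    subst hs
    simp only [List.foldl_nil]
    have hp : pvPost (b, bc, c, m) = if bc ≤ m then c else b := rfl
    by_cases h : bc ≤ m
    · rw [hp, if_pos h]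
      refine Or.inr ⟨List.mem_cons_self .., by simp [pvCnt]; omega, ?_⟩
      intro y hy
      have hyc : y = c := by simpa using hy
      subst hyc; exact Or.inr ⟨rfl, le_refl _⟩
    · rw [hp, if_neg h]
      refine Or.inl ⟨rfl, ?_⟩
      intro y hy
      have hyc : y = c := by simpa using hy
      subst hyc; simp [pvCnt]; omega
  | succ n ih =>
    intro s hlen hpw c hc m hm b bc
    have hd : s.takeWhile (· == c) ++ s.dropWhile (· == c) = s := List.takeWhile_append_dropWhile
    have ht1 : s.takeWhile (· == c) = List.replicate (s.takeWhile (· == c)).length c := by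
      apply List.eq_replicate_of_mem
      intro x hx
      have := List.mem_takeWhile_imp hx
      simpa using this
    set j := (s.takeWhile (· == c)).length with hj
    set t2 := s.dropWhile (· == c) with ht2def
    have hfold : s.foldl pvStep (b, bc, c, m) = t2.foldl pvStep (b, bc, c, m + j) := by
      conv_lhs => rw [← hd, ht1]
      exact pv_foldl_replicate j t2 b bc c m
    have hsrepl : List.replicate j c ++ t2 = s := by rw [← ht1]; exact hd
    have hmem_cs : ∀ y ∈ c :: s, y = c ∨ y ∈ t2 := by
      intro y hy
      rcases List.mem_cons.mp hy with rfl | hy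
      · exact Or.inl rfl
      · rw [← hsrepl] at hy
        rcases List.mem_append.mp hy with hy | hy
        · exact Or.inl (List.eq_of_mem_replicate hy)
        · exact Or.inr hy
    match ht2 : t2 with
    | [] =>
      rw [hfold]
      simp only [List.foldl_nil]
      have hcnt : ∀ y ∈ c :: s, pvCnt s c m y = m + j := by
        intro y hy
        rcases hmem_cs y hy with rfl | hy
        · have hcy : s.count y = j := by rw [← hsrepl]; simp
          simp [pvCnt, hcy]
        · simp at hy
      by_cases hbc : bc ≤ m + j
      · refine Or.inr ⟨?_, ?_, ?_⟩
        · simp [pvPost, hbc]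
        · simp only [pvPost, if_pos hbc]
          rw [hcnt c (List.mem_cons_self ..)]
          exact hbc
        · intro y hy
          have hyc : y = c := by rcases hmem_cs y hy with rfl | h; rfl; simp at h
          subst hyc
          exact Or.inr ⟨by simp [pvPost, hbc], by simp [pvPost, hbc]⟩
      · refine Or.inl ⟨by simp [pvPost, hbc], ?_⟩
        intro y hy
        rw [hcnt y hy]; omega
    | h0 :: t3 =>
      have hh0c : c < h0 := by
        have hne : ¬ (h0 == c) = true := by
          have := List.head_dropWhile_not (· == c) (l := s) (by rw [← ht2def]; simp)
          simpa [← ht2def] using this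
        have hle : c ≤ h0 := hc h0 (by rw [← hsrepl]; simp)
        simp at hne
        exact lt_of_le_of_ne hle (Ne.symm hne)
      have hpwt2 : (h0 :: t3).Pairwise (· ≤ ·) := by
        rw [← hsrepl] at hpw
        exact (List.pairwise_append.mp hpw).2.1
      have hc3 : ∀ y ∈ t3, h0 ≤ y := fun y hy => (List.pairwise_cons.mp hpwt2).1 y hy
      have hct2 : ∀ y ∈ h0 :: t3, c < y := by
        intro y hy
        rcases List.mem_cons.mp hy with rfl | hy
        · exact hh0c
        · exact lt_of_lt_of_le hh0c (hc3 y hy)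
      have hcount_c : s.count c = j := by
        rw [← hsrepl, List.count_append, List.count_replicate, List.count_eq_zero.mpr
          (fun h => absurd rfl (ne_of_gt (hct2 c h)))]
        simp
      have hcnt_c : pvCnt s c m c = m + j := by simp [pvCnt, hcount_c]
      have hcnt_t2 : ∀ y ∈ h0 :: t3, pvCnt s c m y = pvCnt t3 h0 1 y := by
        intro y hy
        have hyc : y ≠ c := ne_of_gt (hct2 y hy)
        have hys : s.count y = (h0 :: t3).count y := by
          rw [← hsrepl, List.count_append]
          simp [List.count_replicate, Ne.symm hyc]
        by_cases hyh : y = h0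
        · subst hyh
          simp [pvCnt, hyc, hys, List.count_cons_self, Nat.add_comm]
        · have hcc : (h0 :: t3).count y = t3.count y := by
            rw [List.count_cons_of_ne (Ne.symm hyh)]
          simp [pvCnt, hyc, hyh, hys, hcc]
      rw [hfold, List.foldl_cons]
      have hlen3 : t3.length ≤ n := by
        have : s.length = j + (t3.length + 1) := by rw [← hsrepl]; simp
        omega
      have hstep : pvStep (b, bc, c, m + j) h0 =
          (if bc ≤ m + j then (c, m + j, h0, 1) else (b, bc, h0, 1)) := by
        simp only [pvStep]
        rw [if_neg (by simp [ne_of_gt hh0c])]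
      by_cases hbc : bc ≤ m + j
      · rw [hstep, if_pos hbc]
        rcases ih t3 hlen3 (List.pairwise_cons.mp hpwt2).2 h0 hc3 1 one_pos c (m + j) with
          ⟨hr, hall⟩ | ⟨hrmem, hrle, hall⟩
        · -- result is c, the open run wins everything in t3
          refine Or.inr ⟨?_, ?_, ?_⟩
          · rw [hr]; exact List.mem_cons_self ..
          · rw [hr, hcnt_c]; omega
          · intro y hy
            rcases hmem_cs y hy with rfl | hyt2
            · exact Or.inr ⟨by rw [hr], by simp [hr]⟩
            · left
              rw [hcnt_t2 y hyt2, hr, hcnt_c]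
              exact hall y hyt2
        · -- result lies in the tail runs
          generalize hrdef : pvPost (t3.foldl pvStep (c, m + j, h0, 1)) = r at hrmem hrle hall ⊢
          have hrs : r ∈ c :: s := by
            rw [← hsrepl]
            exact List.mem_cons_of_mem _ (List.mem_append_right _ hrmem)
          have hcr : pvCnt s c m r = pvCnt t3 h0 1 r := hcnt_t2 r hrmem
          refine Or.inr ⟨hrs, ?_, ?_⟩
          · rw [hcr]; omega
          · intro y hy
            rcases hmem_cs y hy with rfl | hyt2
            · rw [hcnt_c, hcr]
              rcases lt_or_eq_of_le hrle with h | h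
              · left; omega
              · right
                refine ⟨by omega, ?_⟩
                have : h0 ≤ r := by
                  rcases List.mem_cons.mp hrmem with rfl | hr3
                  · exact le_refl _
                  · exact hc3 r hr3
                exact le_of_lt (lt_of_lt_of_le hh0c this)
            · rw [hcnt_t2 y hyt2, hcr]
              exact hall y hyt2
      · rw [hstep, if_neg hbc]
        rcases ih t3 hlen3 (List.pairwise_cons.mp hpwt2).2 h0 hc3 1 one_pos b bc with
          ⟨hr, hall⟩ | ⟨hrmem, hrle, hall⟩
        · refine Or.inl ⟨hr, ?_⟩
          intro y hy
          rcases hmem_cs y hy with rfl | hyt2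
          · rw [hcnt_c]; omega
          · rw [hcnt_t2 y hyt2]
            exact hall y hyt2
        · generalize hrdef : pvPost (t3.foldl pvStep (b, bc, h0, 1)) = r at hrmem hrle hall ⊢
          have hrs : r ∈ c :: s := by
            rw [← hsrepl]
            exact List.mem_cons_of_mem _ (List.mem_append_right _ hrmem)
          have hcr : pvCnt s c m r = pvCnt t3 h0 1 r := hcnt_t2 r hrmem
          refine Or.inr ⟨hrs, ?_, ?_⟩
          · rw [hcr]; omega
          · intro y hy
            rcases hmem_cs y hy with rfl | hyt2
            · rw [hcnt_c, hcr]; left; omega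
            · rw [hcnt_t2 y hyt2, hcr]
              exact hall y hyt2

-- B returns a lexicographic argmax of (count, name) over the normalized list
theorem pv_B_char (rows : List (List (String × String))) (hne : rows.map pvNorm ≠ []) :
    group_domain_py_alt rows ∈ rows.map pvNorm ∧
      ∀ y ∈ rows.map pvNorm, (rows.map pvNorm).count y < (rows.map pvNorm).count (group_domain_py_alt rows) ∨
        ((rows.map pvNorm).count y = (rows.map pvNorm).count (group_domain_py_alt rows) ∧ y ≤ group_domain_py_alt rows) := by
  set ds := rows.map pvNorm with hds
  set s := PySem.List.sorted ds (fun x => x) false with hs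
  have hperm : s.Perm ds := PySem.List.sorted_perm ds (fun x => x) false
  have hsne : s ≠ [] := by
    intro h
    exact hne ((PySem.List.sorted_eq_nil_iff ds (fun x => x) false).mp h)
  obtain ⟨c, t, hct⟩ := List.exists_cons_of_ne_nil hsne
  have hpw : s.Pairwise (· ≤ ·) := by
    have := PySem.List.sorted_pairwise ds (fun x => x)
    simpa [← hs] using this
  have hpwt : t.Pairwise (· ≤ ·) := by rw [hct] at hpw; exact (List.pairwise_cons.mp hpw).2
  have hct' : ∀ y ∈ t, c ≤ y := by rw [hct] at hpw; exact (List.pairwise_cons.mp hpw).1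
  have hval : group_domain_py_alt rows = pvPost (t.foldl pvStep ("", 0, c, 1)) := by
    unfold group_domain_py_alt
    rw [← hds, ← hs, hct]
    rfl
  have hmain := pv_sweep t.length t (le_refl _) hpwt c hct' 1 one_pos "" 0
  -- counts over s and over ds agree
  have hcount : ∀ y, s.count y = ds.count y := fun y => hperm.count_eq y
  have hcnt_eq : ∀ y, pvCnt t c 1 y = ds.count y := by
    intro y
    by_cases hyc : y = c
    · subst hyc
      rw [← hcount y, hct, List.count_cons_self]
      simp [pvCnt]
      omega
    · rw [pvCnt, if_neg hyc, ← hcount y, hct, List.count_cons_of_ne (Ne.symm hyc)]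
  have hmem_s : ∀ y, y ∈ c :: t ↔ y ∈ ds := by
    intro y; rw [← hct]; exact hperm.mem_iff
  rcases hmain with ⟨hr, hall⟩ | ⟨hrmem, _, hall⟩
  · exfalso
    have := hall c (List.mem_cons_self ..)
    omega
  · rw [← hval] at hrmem hall
    refine ⟨(hmem_s _).mp hrmem, ?_⟩
    intro y hy
    have := hall y ((hmem_s y).mpr hy)
    rw [hcnt_eq y, hcnt_eq (group_domain_py_alt rows)] at this
    exact this

-- A returns a lexicographic argmax of (count, name) over the normalized list
theorem pv_A_char (rows : List (List (String × String))) (hne : rows.map pvNorm ≠ []) :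
    group_domain_py rows ∈ rows.map pvNorm ∧
      ∀ y ∈ rows.map pvNorm, (rows.map pvNorm).count y < (rows.map pvNorm).count (group_domain_py rows) ∨
        ((rows.map pvNorm).count y = (rows.map pvNorm).count (group_domain_py rows) ∧ y ≤ group_domain_py rows) := by
  set ds := rows.map pvNorm with hds
  have hcdict : rows.foldl (fun d row => d.modify (pvNorm row) 0 (· + 1)) PySem.Dict.empty
      = PySem.Dict.counter ds := by
    rw [PySem.Dict.counter_eq_foldl, hds, List.foldl_map]
  have hitems : (PySem.Dict.counter ds).items
      = (PySem.Set.ofList ds).map (fun k => (k, (ds.count k : Int))) := PySem.Dict.items_counter ds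
  have hine : (PySem.Dict.counter ds).items ≠ [] := by
    rw [hitems]
    intro h
    obtain ⟨x, xs, hxx⟩ := List.exists_cons_of_ne_nil hne
    have hxm : x ∈ PySem.Set.ofList ds := (PySem.Set.mem_ofList ds x).mpr (by rw [hxx]; exact List.mem_cons_self ..)
    rw [List.map_eq_nil_iff.mp h] at hxm
    simp at hxm
  obtain ⟨mx, hmx, hmxmem, hmxall⟩ :=
    pv_max2_char (PySem.Dict.counter ds).items (fun kv => kv.2) (fun kv => kv.1) hine
  have hval : group_domain_py rows = mx.1 := by
    unfold group_domain_py
    rw [hcdict, if_neg (by simpa [List.isEmpty_iff] using hine), hmx]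
  obtain ⟨k, hkset, hkeq⟩ := List.mem_map.mp (hitems ▸ hmxmem)
  have hkds : k ∈ ds := (PySem.Set.mem_ofList ds k).mp hkset
  refine ⟨by rw [hval, ← hkeq]; exact hkds, ?_⟩
  intro y hy
  have hyitem : (y, (ds.count y : Int)) ∈ (PySem.Dict.counter ds).items := by
    rw [hitems]
    exact List.mem_map.mpr ⟨y, (PySem.Set.mem_ofList ds y).mpr hy, rfl⟩
  have := hmxall _ hyitem
  rw [hval, ← hkeq]
  rw [← hkeq] at this
  simp only at this
  rcases this with h | ⟨h1, h2⟩
  · left; exact_mod_cast h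
  · right; exact ⟨by exact_mod_cast h1, h2⟩

-- the lexicographic argmax of (count, name) is unique
theorem pv_argmax_unique (ds : List String) (r r' : String) (hr : r ∈ ds) (hr' : r' ∈ ds)
    (h1 : ∀ y ∈ ds, ds.count y < ds.count r ∨ (ds.count y = ds.count r ∧ y ≤ r))
    (h2 : ∀ y ∈ ds, ds.count y < ds.count r' ∨ (ds.count y = ds.count r' ∧ y ≤ r')) : r = r' := by
  rcases h1 r' hr' with h | ⟨hc, hle⟩ <;> rcases h2 r hr with h' | ⟨hc', hle'⟩ <;>
    first | omega | exact le_antisymm hle' hle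

-- ===== VERDICT (by name: the statement is the Claim_ definition above) =====
theorem group_domain_py_spec : Claim_equal_group_domain_py := by
  intro rows _
  unfold Spec_group_domain_py
  by_cases hne : rows.map pvNorm = []
  · have hrows : rows = [] := List.map_eq_nil_iff.mp hne
    subst hrows; rfl
  · obtain ⟨hAmem, hAmax⟩ := pv_A_char rows hne
    obtain ⟨hBmem, hBmax⟩ := pv_B_char rows hne
    exact pv_argmax_unique (rows.map pvNorm) _ _ hAmem hBmem hAmax hBmax
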